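-- pv_equiv track=rewrite | github.com/stjordanis/manticore-roadmap | manticoremap/main.py | get_warnings_and_exceptions
-- ===== SOURCE A (Python) =====
-- from collections import Counter
--
-- def get_warnings_and_exceptions(raw_str):
--     warnings = Counter()
--     exception = ''
--
--     lines = raw_str.split('\n')
--     for index, line in enumerate(lines):
--         if ('WARNING' in line or
--             'ERROR' in line or
--             'CRITICAL' in line) \
--                 and 'Unimplemented system call' not in line:
--             warnings.update({line: 1})
--         if 'ERROR: Exception:' in line:
--             exception = '\n'.join(lines[index:])
--             break
--     return warnings, exception
-- ===== SOURCE B (Python) =====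
-- from collections import Counter
--
-- def get_warnings_and_exceptions(raw_str):
--     lines = raw_str.split('\n')
--     idx = next((i for i, l in enumerate(lines) if 'ERROR: Exception:' in l), None)
--     scanned = lines if idx is None else lines[:idx + 1]
--     warnings = Counter(l for l in scanned
--                        if ('WARNING' in l or 'ERROR' in l or 'CRITICAL' in l)
--                        and 'Unimplemented system call' not in l)
--     exception = '' if idx is None else '\n'.join(lines[idx:])
--     return warnings, exception
-- ===== Notes on version B (the rewrite author's own statement) =====
-- stated objective: simpler
-- what changed: Replaces A's single interleaved enumerate-loop with break and in-loop Counter.update by a find-split-point pass (first 'ERROR: Exception:' line index), one Counter built in one shot over the relevant slice, and a tail join.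
import Mathlib
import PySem

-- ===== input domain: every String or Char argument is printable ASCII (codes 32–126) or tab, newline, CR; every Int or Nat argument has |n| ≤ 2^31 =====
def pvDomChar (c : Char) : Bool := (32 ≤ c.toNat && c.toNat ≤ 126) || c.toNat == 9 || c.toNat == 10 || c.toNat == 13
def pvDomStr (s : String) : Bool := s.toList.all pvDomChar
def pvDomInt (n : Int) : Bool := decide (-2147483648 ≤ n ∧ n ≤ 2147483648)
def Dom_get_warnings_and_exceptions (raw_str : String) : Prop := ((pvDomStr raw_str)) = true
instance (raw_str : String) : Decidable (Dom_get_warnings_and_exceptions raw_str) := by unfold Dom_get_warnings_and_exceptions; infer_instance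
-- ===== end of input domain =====

-- B replaces A's interleaved scan-with-break by: find the first 'ERROR: Exception:' line,
-- build the Counter in one shot over the relevant slice, join the tail (simpler decomposition).

-- ===== PORT A =====
-- A's warning test: ('WARNING' in line or 'ERROR' in line or 'CRITICAL' in line) and 'Unimplemented system call' not in line
def pvPredA (line : String) : Bool :=
  (PySem.Str.isIn "WARNING" line || PySem.Str.isIn "ERROR" line || PySem.Str.isIn "CRITICAL" line)
    && !(PySem.Str.isIn "Unimplemented system call" line)

-- s.split('\n') with nonempty separator never raises: split? is always some here, getD [] unreachable
-- A's for-loop over enumerate(lines) with break; Counter.update({line: 1}) is Dict.modify line 0 (· + 1)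
def pvA_go (lines : List String) : List (Int × String) → PySem.Dict String Int → (PySem.Dict String Int) × String
  | [], w => (w, "")
  | (index, line) :: rest, w =>
    let w' := if pvPredA line then w.modify line 0 (· + 1) else w
    if PySem.Str.isIn "ERROR: Exception:" line then
      (w', PySem.Str.join "\n" (PySem.List.slice lines (some index) none))
    else pvA_go lines rest w'

def get_warnings_and_exceptions (raw_str : String) : (List (String × Int)) × String :=
  let lines := ((PySem.Str.split? raw_str "\n").getD [])
  let r := pvA_go lines (PySem.List.enumerate lines 0) PySem.Dict.empty
  (r.1.items, r.2)

-- ===== PORT B =====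
def pvHasExc (line : String) : Bool := PySem.Str.isIn "ERROR: Exception:" line

def pvIsWarning (l : String) : Bool :=
  (PySem.Str.isIn "WARNING" l || PySem.Str.isIn "ERROR" l || PySem.Str.isIn "CRITICAL" l)
    && !(PySem.Str.isIn "Unimplemented system call" l)

-- next((i for i, l in enumerate(lines) if …), None) is List.findIdx?; the index i is a
-- nonnegative list index, so lines[:i+1] / lines[i:] are exactly take (i+1) / drop i
-- (PySem.List.slice_to_natCast / slice_from_natCast).
def get_warnings_and_exceptions_alt (raw_str : String) : (List (String × Int)) × String :=
  let lines := ((PySem.Str.split? raw_str "\n").getD [])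
  let idx? := lines.findIdx? pvHasExc
  let scanned := match idx? with
    | none => lines
    | some i => lines.take (i + 1)
  let warnings := PySem.Dict.counter (scanned.filter pvIsWarning)
  let exception := match idx? with
    | none => ""
    | some i => PySem.Str.join "\n" (lines.drop i)
  (warnings.items, exception)

-- ===== PRECONDITION & SPEC =====
def Spec_get_warnings_and_exceptions (raw_str : String) (out : (List (String × Int)) × String) : Prop := out = get_warnings_and_exceptions_alt raw_str
instance (raw_str : String) (out : (List (String × Int)) × String) : Decidable (Spec_get_warnings_and_exceptions raw_str out) := by unfold Spec_get_warnings_and_exceptions; infer_instance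

-- ===== CLAIM (what is proved, stated in full; the proofs are below) =====
def Claim_equal_get_warnings_and_exceptions : Prop := ∀ (raw_str : String), Dom_get_warnings_and_exceptions raw_str → Spec_get_warnings_and_exceptions raw_str (get_warnings_and_exceptions raw_str)

-- ===== LEMMAS AND PROOFS =====

-- A's loop over the enumerated suffix lines.drop k equals B's find/count/join decomposition of that suffix.
lemma pvA_go_spec (lines : List String) : ∀ (suf : List String) (k : Nat) (w : PySem.Dict String Int),
    lines.drop k = suf →
    pvA_go lines (PySem.List.enumerate suf (k : Int)) w =
      match suf.findIdx? pvHasExc with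
      | none => (((suf.filter pvPredA).foldl (fun d x => d.modify x 0 (· + 1)) w), "")
      | some j => ((((suf.take (j + 1)).filter pvPredA).foldl (fun d x => d.modify x 0 (· + 1)) w),
                   PySem.Str.join "\n" (lines.drop (k + j))) := by
  intro suf
  induction suf with
  | nil => intro k w _; simp [PySem.List.enumerate, pvA_go]
  | cons line rest ih =>
    intro k w hdrop
    rw [PySem.List.enumerate_cons, pvA_go]
    rw [List.findIdx?_cons]
    by_cases hx : pvHasExc line
    · simp only [pvHasExc] at hx
      simp only [hx, if_true, pvHasExc]
      rw [PySem.List.slice_from_natCast, hdrop]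
      simp [List.filter_cons, hdrop]
      split <;> simp
    · have hx' : PySem.Str.isIn "ERROR: Exception:" line = false := by
        simpa [pvHasExc] using hx
      have hdrop' : lines.drop (k + 1) = rest := by
        rw [← List.tail_drop, hdrop]; rfl
      have hih := ih (k + 1) (if pvPredA line then w.modify line 0 (· + 1) else w) hdrop'
      push_cast at hih
      simp only [hx', Bool.false_eq_true, if_false]
      rw [hih]
      simp only [pvHasExc, hx', Bool.false_eq_true, if_false]
      cases hfi : rest.findIdx? pvHasExc with
      | none =>
        simp only [Option.map_none, List.filter_cons]
        split <;> simp
      | some j =>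
        simp only [Option.map_some, List.take_succ_cons, List.filter_cons]
        have harith : k + (j + 1) = k + 1 + j := by omega
        rw [harith]
        split <;> simp

-- ===== VERDICT (by name: the statement is the Claim_ definition above) =====
theorem get_warnings_and_exceptions_spec : Claim_equal_get_warnings_and_exceptions := by
  intro raw_str _
  unfold Spec_get_warnings_and_exceptions
  have h := pvA_go_spec ((PySem.Str.split? raw_str "\n").getD [])
    ((PySem.Str.split? raw_str "\n").getD []) 0 PySem.Dict.empty (by simp)
  simp only [Nat.cast_zero] at h
  simp only [get_warnings_and_exceptions, get_warnings_and_exceptions_alt]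
  rw [h]
  have hpred : pvIsWarning = pvPredA := rfl
  rw [hpred]
  cases hfi : ((PySem.Str.split? raw_str "\n").getD []).findIdx? pvHasExc with
  | none => simp [PySem.Dict.counter_eq_foldl]
  | some j => simp [PySem.Dict.counter_eq_foldl]
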